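-- pv_equiv track=rewrite | github.com/jberkovica/password-validator | pv/pv_script.py | validate_special_char
-- ===== SOURCE A (Python) =====
-- def validate_special_char(password, count):
--     special_chars = r',~!@#$%^&*()_-+={[}}|\:;<>?/'
--     special_chars_counter = 0
--     for p in password:
--         if p in special_chars:
--             special_chars_counter += 1
--
--     if special_chars_counter >= count:
--         return True
--     else:
--         return False
-- ===== SOURCE B (Python) =====
-- def validate_special_char(password, count):
--     special_chars = r',~!@#$%^&*()_-+={[}}|\:;<>?/'
--     total = sum(password.count(c) for c in set(special_chars))
--     return total >= count
-- ===== Notes on version B (the rewrite author's own statement) =====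
-- stated objective: alternative
-- what changed: Instead of a single pass over the password testing each character for membership in the special-chars string, B iterates over the distinct special characters and sums str.count of each over the password.
import Mathlib
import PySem

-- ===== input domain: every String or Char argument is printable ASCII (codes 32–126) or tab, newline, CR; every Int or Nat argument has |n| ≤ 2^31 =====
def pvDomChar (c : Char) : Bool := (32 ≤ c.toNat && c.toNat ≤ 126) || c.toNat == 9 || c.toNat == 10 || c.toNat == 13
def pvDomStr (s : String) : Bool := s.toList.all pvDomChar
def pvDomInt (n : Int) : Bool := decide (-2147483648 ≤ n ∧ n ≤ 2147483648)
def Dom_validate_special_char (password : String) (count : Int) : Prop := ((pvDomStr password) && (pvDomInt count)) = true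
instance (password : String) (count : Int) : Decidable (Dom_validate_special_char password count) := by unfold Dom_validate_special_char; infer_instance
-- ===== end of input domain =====

-- B iterates over the DISTINCT special characters and sums per-character occurrence counts,
-- instead of A's single membership-testing pass over the password; same cost, different decomposition.

-- ===== PORT A =====
-- the special_chars string literal, as a list of characters (note the duplicated '}')
def pvSpecialChars : List Char := ",~!@#$%^&*()_-+={[}}|\\:;<>?/".toList

def validate_special_char (password : String) (count : Int) : Bool :=
  -- for p in password: if p in special_chars: counter += 1
  let counter : Int :=
    password.toList.foldl (fun acc p => if p ∈ pvSpecialChars then acc + 1 else acc) 0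
  if counter ≥ count then true else false

-- ===== PORT B =====
def validate_special_char_alt (password : String) (count : Int) : Bool :=
  -- total = sum(password.count(c) for c in set(special_chars))  (sum is iteration-order independent)
  let total : Int :=
    ((PySem.Set.ofList pvSpecialChars).map (fun c => (password.toList.count c : Int))).sum
  decide (total ≥ count)

-- ===== PRECONDITION & SPEC =====
def Spec_validate_special_char (password : String) (count : Int) (out : Bool) : Prop := out = validate_special_char_alt password count
instance (password : String) (count : Int) (out : Bool) : Decidable (Spec_validate_special_char password count out) := by unfold Spec_validate_special_char; infer_instance

-- ===== CLAIM (what is proved, stated in full; the proofs are below) =====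
def Claim_equal_validate_special_char : Prop := ∀ (password : String) (count : Int), Dom_validate_special_char password count → Spec_validate_special_char password count (validate_special_char password count)

-- ===== LEMMAS AND PROOFS =====

-- summing the 0/1 indicator of a over S is the multiplicity of a in S
theorem pv_sum_indicator (a : Char) (S : List Char) :
    (S.map (fun c => if a == c then 1 else 0)).sum = S.count a := by
  induction S with
  | nil => rfl
  | cons b S ih =>
    simp only [List.map_cons, List.sum_cons, List.count_cons, ih]
    rcases eq_or_ne a b with h | h
    · simp [h]; omega
    · simp [h, Ne.symm h]

-- summing per-character counts over a duplicate-free list S counts exactly the elements of l lying in S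
theorem pv_sum_count (S : List Char) (hS : S.Nodup) (l : List Char) :
    (S.map (fun c => l.count c)).sum = l.countP (· ∈ S) := by
  induction l with
  | nil => simp
  | cons a l ih =>
    have h1 : (S.map (fun c => (a :: l).count c)).sum
        = (S.map (fun c => l.count c)).sum + (S.map (fun c => if a == c then 1 else 0)).sum := by
      simp only [List.count_cons]
      rw [← List.sum_map_add]
    have h2 : (S.map (fun c => if a == c then 1 else 0)).sum = S.count a := pv_sum_indicator a S
    have h3 : S.count a = (if a ∈ S then 1 else 0) := by
      by_cases h : a ∈ S
      · simp [h, List.count_eq_one_of_mem hS h]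
      · simp [h, List.count_eq_zero_of_not_mem h]
    rw [h1, ih, h2, h3, List.countP_cons]
    by_cases h : a ∈ S <;> simp [h]

-- ===== VERDICT (by name: the statement is the Claim_ definition above) =====
theorem validate_special_char_spec : Claim_equal_validate_special_char := by
  intro password count _
  unfold Spec_validate_special_char validate_special_char validate_special_char_alt
  rw [PySem.List.foldl_ite_add_one]
  have hcast : ((PySem.Set.ofList pvSpecialChars).map (fun c => (password.toList.count c : Int))).sum
      = (((PySem.Set.ofList pvSpecialChars).map (fun c => password.toList.count c)).sum : Int) := by
    rw [Nat.cast_list_sum, List.map_map]; rfl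
  rw [hcast, pv_sum_count _ (PySem.Set.nodup_ofList _)]
  have hp : password.toList.countP (· ∈ PySem.Set.ofList pvSpecialChars)
      = password.toList.countP (· ∈ pvSpecialChars) := by
    apply List.countP_congr
    intro x _
    simp [PySem.Set.mem_ofList]
  rw [hp]
  by_cases h : (password.toList.countP (· ∈ pvSpecialChars) : Int) ≥ count <;> simp [h]
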